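-- pv_equiv track=rewrite | github.com/pwborthwick/harpy | source/fci.py | bSetResidue
-- ===== SOURCE A (Python) =====
-- def bSetResidue(residues, spinOrbitals):
--     #populate residues with two particles
--
--     determinants = []
--
--     for residue in residues:
--
--         for i in range(spinOrbitals):
--             mask1 = 1 << i
--             if not bool(residue & mask1):
--                 p = residue | mask1
--
--                 for j in range(i):
--                     mask2 = 1 << j
--                     if not bool(p & mask2):
--                         q = p | mask2
--
--                         determinants.append(q)
--
--     return list(set(determinants))
-- ===== SOURCE B (Python) =====
-- def bSetResidue(residues, spinOrbitals):
--     #populate residues with two particles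
--
--     # build every two-particle mask once, by walking a (hi, lo) bit pair upward,
--     # then OR each mask into every residue it does not collide with
--     masks = []
--     if residues and spinOrbitals >= 2:
--         limit = 1 << spinOrbitals
--         hi = 2
--         lo = 1
--         while hi < limit:
--             masks.append(hi | lo)
--             lo <<= 1
--             if lo == hi:
--                 hi <<= 1
--                 lo = 1
--
--     determinants = [residue | mask for residue in residues
--                     for mask in masks if not residue & mask]
--
--     return list(set(determinants))
-- ===== Notes on version B (the rewrite author's own statement) =====
-- stated objective: alternative
-- what changed: A runs a doubly nested occupancy-testing bit scan over range(spinOrbitals) separately for every residue; B builds the table of all two-particle bit masks once, residue-independently, by walking a (hi, lo) bit pair upward with shifts in a single while loop, then applies each mask to each residue with one disjointness test.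
import Mathlib
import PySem

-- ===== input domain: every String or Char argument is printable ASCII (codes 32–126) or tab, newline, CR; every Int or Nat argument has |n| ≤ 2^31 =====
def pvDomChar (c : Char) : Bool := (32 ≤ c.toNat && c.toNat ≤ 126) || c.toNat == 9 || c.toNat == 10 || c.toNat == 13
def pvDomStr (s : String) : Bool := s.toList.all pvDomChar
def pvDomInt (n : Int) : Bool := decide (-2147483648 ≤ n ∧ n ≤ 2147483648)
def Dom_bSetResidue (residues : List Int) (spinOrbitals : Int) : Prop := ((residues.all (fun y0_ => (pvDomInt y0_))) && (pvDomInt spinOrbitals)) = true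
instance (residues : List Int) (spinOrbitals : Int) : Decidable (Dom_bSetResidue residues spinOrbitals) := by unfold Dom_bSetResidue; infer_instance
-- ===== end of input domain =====

-- B builds the two-particle mask table once (residue-independently) by walking a
-- (hi, lo) bit pair upward with shifts, then ORs each mask into every residue it
-- does not collide with (alternative decomposition; same exact return value).

-- ===== PORT A =====
def bSetResidue (residues : List Int) (spinOrbitals : Int) : List Int :=
  let determinants : List Int :=
    residues.foldl (fun determinants residue =>
      (PySem.List.pyRange 0 spinOrbitals 1).foldl (fun determinants i =>
        let mask1 : Int := ((1 <<< i.toNat : Nat) : Int)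
        if PySem.Int.band residue mask1 == 0 then
          let p : Int := PySem.Int.bor residue mask1
          (PySem.List.pyRange 0 i 1).foldl (fun determinants j =>
            let mask2 : Int := ((1 <<< j.toNat : Nat) : Int)
            if PySem.Int.band p mask2 == 0 then
              determinants ++ [PySem.Int.bor p mask2]
            else determinants) determinants
        else determinants) determinants) []
  PySem.Set.ofList determinants

-- ===== PORT B =====
-- the while loop of Source B, with fuel only to make the recursion total
-- (pvMaskLoop_fuel_enough below shows the supplied fuel is never exhausted)
def pvMaskLoop (limit : Nat) : Nat → Nat → Nat → List Int → List Int
  | 0, _, _, masks => masks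
  | fuel+1, hi, lo, masks =>
    if hi < limit then
      let masks := masks ++ [((hi ||| lo : Nat) : Int)]
      let lo' := lo <<< 1
      if lo' = hi then pvMaskLoop limit fuel (hi <<< 1) 1 masks
      else pvMaskLoop limit fuel hi lo' masks
    else masks

def bSetResidue_alt (residues : List Int) (spinOrbitals : Int) : List Int :=
  let masks : List Int :=
    if residues ≠ [] ∧ spinOrbitals ≥ 2 then
      pvMaskLoop (1 <<< spinOrbitals.toNat) (2 * (1 <<< spinOrbitals.toNat)) 2 1 []
    else []
  let determinants : List Int :=
    residues.flatMap (fun residue =>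
      (masks.filter (fun mask => PySem.Int.band residue mask == 0)).map
        (fun mask => PySem.Int.bor residue mask))
  PySem.Set.ofList determinants

-- ===== PRECONDITION & SPEC =====
def Spec_bSetResidue (residues : List Int) (spinOrbitals : Int) (out : List Int) : Prop := out = bSetResidue_alt residues spinOrbitals
instance (residues : List Int) (spinOrbitals : Int) (out : List Int) : Decidable (Spec_bSetResidue residues spinOrbitals out) := by unfold Spec_bSetResidue; infer_instance

-- ===== CLAIM (what is proved, stated in full; the proofs are below) =====
def Claim_equal_bSetResidue : Prop := ∀ (residues : List Int) (spinOrbitals : Int), Dom_bSetResidue residues spinOrbitals → Spec_bSetResidue residues spinOrbitals (bSetResidue residues spinOrbitals)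

-- ===== LEMMAS AND PROOFS =====

theorem pvHalfAnd (a b : Nat) : a &&& b = 2 * (a/2 &&& b/2) + (a%2) * (b%2) := by
  have hc : (a%2) * (b%2) < 2 := by
    rcases Nat.mod_two_eq_zero_or_one a with h|h <;> rcases Nat.mod_two_eq_zero_or_one b with h'|h' <;> simp [h,h']
  apply Nat.eq_of_testBit_eq
  intro k
  cases k with
  | zero =>
      rw [Nat.testBit_zero, Nat.testBit_zero, ← Nat.testBit_zero (a &&& b), Nat.testBit_land,
        Nat.testBit_zero, Nat.testBit_zero]
      have h2 : (2 * (a/2 &&& b/2) + (a%2) * (b%2)) % 2 = (a%2) * (b%2) := by omega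
      rw [h2]
      rcases Nat.mod_two_eq_zero_or_one a with h|h <;> rcases Nat.mod_two_eq_zero_or_one b with h'|h' <;> simp [h,h']
  | succ k =>
      have h2 : (2 * (a/2 &&& b/2) + (a%2) * (b%2)) / 2 = a/2 &&& b/2 := by omega
      rw [Nat.testBit_add_one, Nat.testBit_add_one, h2, ← Nat.testBit_add_one,
        Nat.testBit_land, Nat.testBit_add_one, Nat.testBit_add_one, ← Nat.testBit_land]

theorem pvHalfXor (a b : Nat) : a ^^^ b = 2 * (a/2 ^^^ b/2) + (a%2 + b%2) % 2 := by
  have hc : (a%2 + b%2) % 2 < 2 := Nat.mod_lt _ (by omega)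
  apply Nat.eq_of_testBit_eq
  intro k
  cases k with
  | zero =>
      rw [Nat.testBit_zero, Nat.testBit_zero]
      have h2 : (2 * (a/2 ^^^ b/2) + (a%2 + b%2) % 2) % 2 = (a%2 + b%2) % 2 := by omega
      rw [h2, ← Nat.testBit_zero (a ^^^ b), Nat.testBit_xor, Nat.testBit_zero, Nat.testBit_zero]
      rcases Nat.mod_two_eq_zero_or_one a with h|h <;> rcases Nat.mod_two_eq_zero_or_one b with h'|h' <;> simp [h,h']
  | succ k =>
      have h2 : (2 * (a/2 ^^^ b/2) + (a%2 + b%2) % 2) / 2 = a/2 ^^^ b/2 := by omega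
      rw [Nat.testBit_add_one, Nat.testBit_add_one, h2, ← Nat.testBit_add_one,
        Nat.testBit_xor, Nat.testBit_add_one, Nat.testBit_add_one, ← Nat.testBit_xor]

theorem pvSubAnd (a b : Nat) : a - (a &&& b) = a ^^^ (a &&& b) := by
  induction a using Nat.strong_induction_on generalizing b with
  | _ a ih =>
    rcases Nat.eq_zero_or_pos a with rfl | ha
    · simp
    · have h1 := pvHalfAnd a b
      have hle2 : a/2 &&& b/2 ≤ a/2 := Nat.and_le_left
      have hc : (a%2) * (b%2) ≤ a%2 := by
        rcases Nat.mod_two_eq_zero_or_one b with h'|h' <;> simp [h']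
      have ih2 := ih (a/2) (Nat.div_lt_self ha one_lt_two) (b/2)
      have h2 := pvHalfXor a (a &&& b)
      have hd : (a &&& b) / 2 = a/2 &&& b/2 := by omega
      have hm : (a &&& b) % 2 = (a%2) * (b%2) := by omega
      rw [hd, hm] at h2
      have hb2 : b % 2 ≤ 1 := by omega
      have hx : (a%2 + (a%2) * (b%2)) % 2 = a%2 - (a%2) * (b%2) := by
        rcases Nat.mod_two_eq_zero_or_one a with h|h <;> rcases Nat.mod_two_eq_zero_or_one b with h'|h' <;> simp [h,h']
      rw [hx] at h2
      omega

theorem pvSubAndBit (a b k : Nat) : (a - (a &&& b)).testBit k = (a.testBit k && !(b.testBit k)) := by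
  rw [pvSubAnd, Nat.testBit_xor, Nat.testBit_land]
  cases a.testBit k <;> cases b.testBit k <;> rfl

theorem pvEqZeroIffBits (n : Nat) : n = 0 ↔ ∀ k, n.testBit k = false := by
  constructor
  · rintro rfl k; exact Nat.zero_testBit k
  · intro h; exact Nat.eq_of_testBit_eq (fun k => by rw [h k, Nat.zero_testBit])

theorem pvOrEqZero (a b : Nat) : a ||| b = 0 ↔ a = 0 ∧ b = 0 := by
  rw [pvEqZeroIffBits, pvEqZeroIffBits, pvEqZeroIffBits]
  simp only [Nat.testBit_lor, Bool.or_eq_false_iff, forall_and]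

theorem pvBandOrZero (r : Int) (x y : Nat) :
    (PySem.Int.band r ((x ||| y : Nat) : Int) = 0) ↔
      (PySem.Int.band r ((x : Nat) : Int) = 0 ∧ PySem.Int.band r ((y : Nat) : Int) = 0) := by
  by_cases hr : 0 ≤ r
  · simp only [PySem.Int.band, hr, if_true, Int.natCast_nonneg, Int.toNat_natCast]
    rw [Int.natCast_eq_zero, Int.natCast_eq_zero, Int.natCast_eq_zero,
      Nat.and_or_distrib_left, pvOrEqZero]
  · simp only [PySem.Int.band, hr, if_false, Int.natCast_nonneg, if_true, Int.toNat_natCast]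
    rw [Int.natCast_eq_zero, Int.natCast_eq_zero, Int.natCast_eq_zero]
    have hb : ∀ (p q c : Bool), ((p||q)&&c) = (p&&c || q&&c) := by decide
    rw [pvEqZeroIffBits, pvEqZeroIffBits, pvEqZeroIffBits]
    simp only [pvSubAndBit, Nat.testBit_lor, hb, Bool.or_eq_false_iff, forall_and]

theorem pvBorOrAssoc (r : Int) (x y : Nat) :
    PySem.Int.bor (PySem.Int.bor r ((x : Nat) : Int)) ((y : Nat) : Int)
      = PySem.Int.bor r ((x ||| y : Nat) : Int) := by
  by_cases hr : 0 ≤ r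
  · simp only [PySem.Int.bor, hr, if_true, Int.natCast_nonneg, Int.toNat_natCast,
      Nat.or_assoc]
  · simp only [PySem.Int.bor, hr, if_false, Int.natCast_nonneg, if_true, Int.toNat_natCast]
    have hneg : ¬ (0 : Int) ≤ -↑((-r - 1).toNat - ((-r - 1).toNat &&& x)) - 1 := by
      have := Int.natCast_nonneg ((-r - 1).toNat - ((-r - 1).toNat &&& x))
      omega
    simp only [hneg, if_false]
    have harg : (-(-↑((-r - 1).toNat - ((-r - 1).toNat &&& x)) - 1) - 1 : Int).toNat
        = (-r - 1).toNat - ((-r - 1).toNat &&& x) := by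
      have : (-(-↑((-r - 1).toNat - ((-r - 1).toNat &&& x)) - 1) - 1 : Int)
          = ↑((-r - 1).toNat - ((-r - 1).toNat &&& x)) := by ring
      rw [this, Int.toNat_natCast]
    rw [harg]
    have hnat : (-r-1).toNat - ((-r-1).toNat &&& x) - (((-r-1).toNat - ((-r-1).toNat &&& x)) &&& y)
        = (-r-1).toNat - ((-r-1).toNat &&& (x|||y)) := by
      apply Nat.eq_of_testBit_eq
      intro k
      simp only [pvSubAndBit, Nat.testBit_lor]
      cases ((-r - 1).toNat).testBit k <;> cases x.testBit k <;> cases y.testBit k <;> rfl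
    rw [hnat]

theorem pvBandKey (r : Int) (i j : Nat) (hij : i ≠ j) :
    PySem.Int.band (PySem.Int.bor r ((1 <<< i : Nat) : Int)) ((1 <<< j : Nat) : Int)
      = PySem.Int.band r ((1 <<< j : Nat) : Int) := by
  have hxj : (1 <<< i : Nat).testBit j = false := by
    rw [Nat.one_shiftLeft, Nat.testBit_two_pow]
    simp [hij]
  by_cases hr : 0 ≤ r
  · simp only [PySem.Int.band, PySem.Int.bor, hr, if_true, Int.natCast_nonneg, Int.toNat_natCast]
    congr 1
    apply Nat.eq_of_testBit_eq
    intro k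
    simp only [Nat.testBit_land, Nat.testBit_lor]
    rcases eq_or_ne k j with rfl | hk
    · rw [hxj]; cases r.toNat.testBit k <;> rfl
    · have h0 : (1 <<< j : Nat).testBit k = false := by
        rw [Nat.one_shiftLeft, Nat.testBit_two_pow]; simp [Ne.symm hk]
      rw [h0]; cases r.toNat.testBit k <;> cases (1 <<< i : Nat).testBit k <;> rfl
  · simp only [PySem.Int.bor, hr, if_false, Int.natCast_nonneg, if_true]
    have hneg : ¬ (0 : Int) ≤ -↑((-r - 1).toNat - ((-r - 1).toNat &&& (1 <<< i))) - 1 := by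
      have := Int.natCast_nonneg ((-r - 1).toNat - ((-r - 1).toNat &&& (1 <<< i)))
      omega
    simp only [PySem.Int.band, hneg, if_false, hr, Int.natCast_nonneg, if_true, Int.toNat_natCast]
    have harg : (-(-↑((-r - 1).toNat - ((-r - 1).toNat &&& (1 <<< i))) - 1) - 1 : Int).toNat
        = (-r - 1).toNat - ((-r - 1).toNat &&& (1 <<< i)) := by
      have : (-(-↑((-r - 1).toNat - ((-r - 1).toNat &&& (1 <<< i))) - 1) - 1 : Int)
          = ↑((-r - 1).toNat - ((-r - 1).toNat &&& (1 <<< i))) := by ring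
      rw [this, Int.toNat_natCast]
    rw [harg]
    congr 2
    apply Nat.eq_of_testBit_eq
    intro k
    simp only [Nat.testBit_land, pvSubAndBit]
    rcases eq_or_ne k j with rfl | hk
    · rw [hxj]; simp
    · have h0 : (1 <<< j : Nat).testBit k = false := by
        rw [Nat.one_shiftLeft, Nat.testBit_two_pow]; simp [Ne.symm hk]
      rw [h0]; cases ((-r-1).toNat).testBit k <;> cases (1 <<< i : Nat).testBit k <;> rfl

def pvMask (i j : Nat) : Int := ((1 <<< i ||| 1 <<< j : Nat) : Int)

def pvMspec (s : Nat) : List Int :=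
  (List.range s).flatMap (fun i => (List.range i).map (fun j => pvMask i j))

def pvTail (s a b : Nat) : List Int :=
  if s ≤ a then []
  else (List.range' b (a-b)).map (fun j => pvMask a j)
    ++ (List.range' (a+1) (s-(a+1))).flatMap (fun i => (List.range i).map (fun j => pvMask i j))

theorem pvPowLt (a b : Nat) : (1 <<< a : Nat) < (1 <<< b : Nat) ↔ a < b := by
  rw [Nat.one_shiftLeft, Nat.one_shiftLeft]
  exact Nat.pow_lt_pow_iff_right one_lt_two

theorem pvLoop (s : Nat) : ∀ (fuel a b : Nat) (masks : List Int), b < a →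
    2 * (1 <<< s) ≤ fuel + (1 <<< a) + (1 <<< b) →
    pvMaskLoop (1 <<< s) fuel (1 <<< a) (1 <<< b) masks = masks ++ pvTail s a b := by
  intro fuel
  induction fuel with
  | zero =>
      intro a b masks hba hfuel
      have h1 : (1 <<< b : Nat) < (1 <<< a : Nat) := (pvPowLt b a).mpr hba
      have hge : ¬ (1 <<< a : Nat) < (1 <<< s : Nat) := by omega
      have hsa : s ≤ a := by
        by_contra h
        exact hge ((pvPowLt a s).mpr (by omega))
      rw [pvMaskLoop, pvTail, if_pos hsa, List.append_nil]
  | succ fuel ih =>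
      intro a b masks hba hfuel
      rw [pvMaskLoop]
      by_cases hlt : (1 <<< a : Nat) < (1 <<< s : Nat)
      · rw [if_pos hlt]
        have has : a < s := (pvPowLt a s).mp hlt
        have hshift : (1 <<< b : Nat) <<< 1 = (1 <<< (b+1) : Nat) :=
          (Nat.shiftLeft_add 1 b 1).symm
        have hashift : (1 <<< a : Nat) <<< 1 = (1 <<< (a+1) : Nat) :=
          (Nat.shiftLeft_add 1 a 1).symm
        by_cases heq : ((1 <<< b : Nat) <<< 1) = (1 <<< a : Nat)
        · rw [if_pos heq]
          have hb1 : b + 1 = a := by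
            rw [hshift] at heq
            exact Nat.pow_right_injective (le_refl 2) (by
              rw [Nat.one_shiftLeft, Nat.one_shiftLeft] at heq; exact heq)
          subst hb1
          have hih := ih (b+1+1) 0 (masks ++ [((1 <<< (b+1) ||| 1 <<< b : Nat) : Int)]) (by omega) (by
            have e1 : (1 <<< (b+1+1) : Nat) = 2 * (1 <<< (b+1)) := by
              rw [Nat.one_shiftLeft, Nat.one_shiftLeft, Nat.pow_succ]; ring
            have e15 : (1 <<< (b+1) : Nat) = 2 * (1 <<< b) := by
              rw [Nat.one_shiftLeft, Nat.one_shiftLeft, Nat.pow_succ]; ring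
            have e2 : (1 <<< b : Nat) ≥ 1 := Nat.one_le_two_pow.trans_eq (Nat.one_shiftLeft b).symm
            omega)
          rw [show (1:Nat) <<< 0 = 1 from rfl] at hih
          rw [hashift, hih]
          by_cases hs2 : s ≤ b + 1 + 1
          · rw [pvTail, if_pos hs2, pvTail, if_neg (by omega : ¬ s ≤ b+1)]
            have hz : s - (b+1+1) = 0 := by omega
            have hr1 : b+1-b = 1 := by omega
            rw [hz, hr1]
            simp [pvMask]
          · rw [pvTail, if_neg hs2, pvTail, if_neg (by omega : ¬ s ≤ b+1)]
            have hr1 : b+1-b = 1 := by omega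
            have hsp : s - (b+1+1) = (s - (b+1+1+1)) + 1 := by omega
            rw [hr1, show List.range' b 1 = [b] from by simp, hsp, List.range'_succ,
              List.flatMap_cons]
            have hr0 : List.range' 0 (b+1+1-0) = List.range (b+1+1) := by
              rw [Nat.sub_zero, List.range_eq_range']
            rw [hr0]
            simp [pvMask, List.append_assoc]
        · rw [if_neg heq]
          have hb1 : b + 1 ≠ a := by
            intro h; apply heq; rw [hshift, h]
          rw [hshift]
          rw [ih a (b+1) _ (by omega) (by
            have e2 : (1 <<< (b+1) : Nat) = 2 * (1 <<< b) := by
              rw [Nat.one_shiftLeft, Nat.one_shiftLeft, Nat.pow_succ]; ring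
            have e3 : (1 <<< b : Nat) ≥ 1 := Nat.one_le_two_pow.trans_eq (Nat.one_shiftLeft b).symm
            omega)]
          rw [pvTail, if_neg (by omega), pvTail, if_neg (by omega)]
          have hr : List.range' b (a-b) = b :: List.range' (b+1) (a-(b+1)) := by
            have : a - b = (a - (b+1)) + 1 := by omega
            rw [this, List.range'_succ]
          rw [hr]
          simp [pvMask, Nat.one_shiftLeft, List.append_assoc]
      · rw [if_neg hlt]
        have hsa : s ≤ a := by
          by_contra h
          exact hlt ((pvPowLt a s).mpr (by omega))
        rw [pvTail, if_pos hsa, List.append_nil]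

theorem pvMasksEq (s : Nat) (h : 2 ≤ s) :
    pvMaskLoop (1 <<< s) (2 * (1 <<< s)) 2 1 [] = pvMspec s := by
  have hlp := pvLoop s (2 * (1 <<< s)) 1 0 [] (by omega) (by omega)
  rw [show (1:Nat) <<< 0 = 1 from rfl, show (1:Nat) <<< 1 = 2 from rfl] at hlp
  rw [hlp, pvTail, if_neg (by omega), pvMspec]
  have hr : List.range s = 0 :: 1 :: List.range' 2 (s-2) := by
    rw [List.range_eq_range', show s = ((s-2)+1)+1 from by omega, List.range'_succ,
      List.range'_succ]
    have : s - 2 + 1 + 1 - 2 = s - 2 := by omega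
    rw [this]
  rw [hr]
  simp [pvMask]

theorem pvAcharNat (r : Int) : ∀ (s : Nat) (acc : List Int),
    ((PySem.List.pyRange 0 (s : Int) 1).foldl (fun determinants i =>
        let mask1 : Int := ((1 <<< i.toNat : Nat) : Int)
        if PySem.Int.band r mask1 == 0 then
          let p : Int := PySem.Int.bor r mask1
          (PySem.List.pyRange 0 i 1).foldl (fun determinants j =>
            let mask2 : Int := ((1 <<< j.toNat : Nat) : Int)
            if PySem.Int.band p mask2 == 0 then
              determinants ++ [PySem.Int.bor p mask2]
            else determinants) determinants
        else determinants) acc)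
      = acc ++ ((pvMspec s).filter (fun m => PySem.Int.band r m == 0)).map
          (fun m => PySem.Int.bor r m) := by
  intro s
  induction s with
  | zero =>
      intro acc
      rw [show ((0:Nat):Int) = 0 from rfl, PySem.List.pyRange_one_eq_nil (le_refl 0)]
      simp [pvMspec]
  | succ s ih =>
      intro acc
      have hcast : ((s+1 : Nat) : Int) = (s : Int) + 1 := by push_cast; ring
      rw [hcast, PySem.List.pyRange_one_succ_right (by positivity), List.foldl_append]
      rw [ih]
      simp only [List.foldl_cons, List.foldl_nil]
      have htoNat : ((s : Int)).toNat = s := Int.toNat_natCast s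
      rw [htoNat]
      have hms : pvMspec (s+1) = pvMspec s ++ (List.range s).map (fun j => pvMask s j) := by
        rw [pvMspec, pvMspec, List.range_succ, List.flatMap_append]
        simp
      rw [hms, List.filter_append, List.map_append, ← List.append_assoc]
      by_cases hg : PySem.Int.band r ((1 <<< s : Nat) : Int) == 0
      · rw [if_pos hg]
        rw [PySem.List.foldl_append_if
              (fun j : Int => PySem.Int.band (PySem.Int.bor r ((1 <<< s : Nat) : Int)) ((1 <<< j.toNat : Nat) : Int) == 0)
              (fun j : Int => PySem.Int.bor (PySem.Int.bor r ((1 <<< s : Nat) : Int)) ((1 <<< j.toNat : Nat) : Int))]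
        congr 1
        rw [PySem.List.pyRange_zero_natCast, List.filter_map, List.map_map, List.filter_map,
          List.map_map]
        have hfc : ∀ j ∈ List.range s,
            ((fun j : Int => PySem.Int.band (PySem.Int.bor r ((1 <<< s : Nat) : Int)) ((1 <<< j.toNat : Nat) : Int) == 0) ∘ (fun k : Nat => (k : Int))) j
              = (fun j : Nat => PySem.Int.band r (pvMask s j) == 0) j := by
          intro j hj
          rw [List.mem_range] at hj
          simp only [Function.comp, Int.toNat_natCast]
          rw [pvBandKey r s j (by omega)]
          have h0 : PySem.Int.band r ((1 <<< s : Nat) : Int) = 0 := by simpa using hg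
          have h1 : PySem.Int.band r (pvMask s j) = 0 ↔ PySem.Int.band r ((1 <<< j : Nat) : Int) = 0 := by
            rw [pvMask, pvBandOrZero]
            exact ⟨fun h => h.2, fun h => ⟨h0, h⟩⟩
          rw [Bool.eq_iff_iff]
          simp only [beq_iff_eq]
          exact h1.symm
        rw [List.filter_congr hfc]
        apply List.map_congr_left
        intro j hj
        rw [List.mem_filter, List.mem_range] at hj
        simp only [Function.comp, Int.toNat_natCast]
        rw [pvBorOrAssoc, pvMask]
      · rw [if_neg hg]
        have hnil : (((List.range s).map (fun j => pvMask s j)).filter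
            (fun m => PySem.Int.band r m == 0)) = [] := by
          apply List.filter_eq_nil_iff.mpr
          intro m hm
          rw [List.mem_map] at hm
          obtain ⟨j, hj, rfl⟩ := hm
          rw [pvMask]
          simp only [beq_iff_eq] at hg ⊢
          intro hcon
          exact hg ((pvBandOrZero r _ _).mp hcon).1
        rw [hnil]
        simp

theorem pvAchar (r n : Int) (acc : List Int) :
    ((PySem.List.pyRange 0 n 1).foldl (fun determinants i =>
        let mask1 : Int := ((1 <<< i.toNat : Nat) : Int)
        if PySem.Int.band r mask1 == 0 then
          let p : Int := PySem.Int.bor r mask1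
          (PySem.List.pyRange 0 i 1).foldl (fun determinants j =>
            let mask2 : Int := ((1 <<< j.toNat : Nat) : Int)
            if PySem.Int.band p mask2 == 0 then
              determinants ++ [PySem.Int.bor p mask2]
            else determinants) determinants
        else determinants) acc)
      = acc ++ ((pvMspec n.toNat).filter (fun m => PySem.Int.band r m == 0)).map
          (fun m => PySem.Int.bor r m) := by
  by_cases hn : n ≤ 0
  · rw [PySem.List.pyRange_one_eq_nil hn]
    have : n.toNat = 0 := by omega
    rw [this]
    simp [pvMspec]
  · have h : n = ((n.toNat : Nat) : Int) := by omega
    rw [h, pvAcharNat, Int.toNat_natCast]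

theorem pvMspecSmall (s : Nat) (h : s ≤ 1) : pvMspec s = [] := by
  interval_cases s <;> rfl

-- ===== VERDICT (by name: the statement is the Claim_ definition above) =====
theorem bSetResidue_spec : Claim_equal_bSetResidue := by
  intro residues spinOrbitals _
  unfold Spec_bSetResidue
  unfold bSetResidue bSetResidue_alt
  simp only []
  rcases eq_or_ne residues [] with rfl | hres
  · rfl
  have hmasks : (if residues ≠ [] ∧ spinOrbitals ≥ 2 then
      pvMaskLoop (1 <<< spinOrbitals.toNat) (2 * (1 <<< spinOrbitals.toNat)) 2 1 []
    else []) = pvMspec spinOrbitals.toNat := by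
    by_cases h2 : spinOrbitals ≥ 2
    · rw [if_pos ⟨hres, h2⟩, pvMasksEq _ (by omega)]
    · rw [if_neg (by tauto), pvMspecSmall _ (by omega)]
  rw [hmasks]
  congr 1
  rw [PySem.List.foldl_congr_mem residues _ (fun acc r =>
      acc ++ ((pvMspec spinOrbitals.toNat).filter (fun m => PySem.Int.band r m == 0)).map
          (fun m => PySem.Int.bor r m)) []
    (fun acc r _ => pvAchar r spinOrbitals acc)]
  rw [PySem.List.foldl_append_eq_flatMap]
  rfl
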